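-- pv_equiv track=rewrite | github.com/nttmkhang/String_Buoi | TYPING_Python/TYPING_Python.py | Process
-- ===== SOURCE A (Python) =====
-- MOD = 1000000007
--
-- def Process(s):
--     dem = 1
--     kq = 1
--     for i in range(1, len(s)):
--         if s[i] == s[i - 1]:
--             dem += 1
--         else:
--             kq = (kq * dem) % MOD
--             dem = 1
--     kq = (kq * dem) % MOD
--     return str(kq)
-- ===== SOURCE B (Python) =====
-- MOD = 1000000007
--
-- def Process(s):
--     # Two-pass: materialize the start index of every maximal run, then fold
--     # the run lengths (differences of consecutive cut points) modulo MOD.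
--     cuts = [i for i in range(len(s)) if i == 0 or s[i] != s[i - 1]] + [len(s)]
--     kq = 1
--     for a, b in zip(cuts, cuts[1:]):
--         kq = kq * (b - a) % MOD
--     return str(kq)
-- ===== Notes on version B (the rewrite author's own statement) =====
-- stated objective: alternative
-- what changed: A counts the current run in one loop with a counter and multiplies at each run change; B makes two passes: it first materializes the list of run-start cut indices, then folds the differences of consecutive cuts modulo 1000000007.
import Mathlib
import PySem

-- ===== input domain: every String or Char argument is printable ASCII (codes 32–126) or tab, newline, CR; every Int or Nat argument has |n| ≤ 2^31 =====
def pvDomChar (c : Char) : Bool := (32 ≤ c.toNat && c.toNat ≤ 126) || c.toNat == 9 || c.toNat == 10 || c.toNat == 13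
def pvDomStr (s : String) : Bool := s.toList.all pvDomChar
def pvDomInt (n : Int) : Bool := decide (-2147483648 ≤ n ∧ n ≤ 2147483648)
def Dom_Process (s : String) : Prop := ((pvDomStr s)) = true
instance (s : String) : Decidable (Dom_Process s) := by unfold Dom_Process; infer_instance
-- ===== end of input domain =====

-- B replaces A's single counting loop by two passes: materialize the run-start cut
-- indices, then fold the differences of consecutive cuts modulo 1000000007 (objective: alternative).

-- ===== PORT A =====
def Process (s : String) : String :=
  let cs := s.toList
  let r := (PySem.List.pyRange 1 (cs.length : Int) 1).foldl
    (fun (p : Int × Int) (i : Int) =>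
      if PySem.List.pyGet? cs i = PySem.List.pyGet? cs (i - 1) then (p.1 + 1, p.2)
      else (1, PySem.Int.mod (p.2 * p.1) 1000000007))
    (1, 1)
  PySem.Int.toStr (PySem.Int.mod (r.2 * r.1) 1000000007)

-- ===== PORT B =====
def Process_alt (s : String) : String :=
  let cs := s.toList
  let cuts := ((PySem.List.pyRange 0 (cs.length : Int) 1).filter
      (fun i => i == 0 || PySem.List.pyGet? cs i != PySem.List.pyGet? cs (i - 1)))
    ++ [(cs.length : Int)]
  let kq := (cuts.zip (cuts.drop 1)).foldl
      (fun (a : Int) (p : Int × Int) => PySem.Int.mod (a * (p.2 - p.1)) 1000000007) 1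
  PySem.Int.toStr kq

-- ===== PRECONDITION & SPEC =====
def Spec_Process (s : String) (out : String) : Prop := out = Process_alt s
instance (s : String) (out : String) : Decidable (Spec_Process s out) := by unfold Spec_Process; infer_instance

-- ===== CLAIM (what is proved, stated in full; the proofs are below) =====
def Claim_equal_Process : Prop := ∀ (s : String), Dom_Process s → Spec_Process s (Process s)

-- ===== LEMMAS AND PROOFS =====

-- run lengths of the pair list, current run already of length d
def pvRlf : Int → List (Char × Char) → List Int
  | d, [] => [d]
  | d, q :: r => if q.2 = q.1 then pvRlf (d+1) r else d :: pvRlf 1 r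

-- run-start boundary indices (> 0), next index is j
def pvBnds : Int → List (Char × Char) → List Int
  | _, [] => []
  | j, q :: r => if q.2 = q.1 then pvBnds (j+1) r else j :: pvBnds (j+1) r

def pvDiffs : List Int → List Int
  | [] => []
  | [_] => []
  | x :: y :: r => (y - x) :: pvDiffs (y :: r)

def pvMulMod (a x : Int) : Int := PySem.Int.mod (a * x) 1000000007

-- A's index fold over range(1, len) equals a fold over adjacent pairs
theorem pv_foldl_adj {α : Type} (f : α → Option Char → Option Char → α) :
    ∀ (cs : List Char) (init : α),
    (List.range (cs.length - 1)).foldl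
        (fun a k => f a cs[k]? cs[k + 1]?) init
    = (cs.zip cs.tail).foldl (fun a q => f a (some q.1) (some q.2)) init := by
  intro cs
  induction cs with
  | nil => intro init; rfl
  | cons c t ih =>
    intro init
    cases t with
    | nil => rfl
    | cons d t' =>
      have hlen : (c :: d :: t').length - 1 = t'.length + 1 := by simp
      rw [hlen, List.range_succ_eq_map, List.foldl_cons, List.foldl_map]
      simp only [List.getElem?_cons_succ, List.getElem?_cons_zero]
      simp only [List.length_cons, Nat.add_sub_cancel, List.getElem?_cons_succ,
        List.tail_cons] at ih
      simp only [List.tail_cons, List.zip_cons_cons, List.foldl_cons]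
      exact ih (f init (some c) (some d))

theorem pv_bnds_shift (r : List (Char × Char)) :
    ∀ (j : Int), pvBnds (j + 1) r = (pvBnds j r).map (· + 1) := by
  induction r with
  | nil => intro j; rfl
  | cons q r ih =>
    intro j
    by_cases h : q.2 = q.1 <;> simp [pvBnds, h, ih (j+1)]

-- B's index filter over range(1, len) equals the structural boundary list
theorem pv_filter_adj :
    ∀ (cs : List Char),
    ((List.range (cs.length - 1)).filter
        (fun k => cs[k + 1]? != cs[k]?)).map (fun (k : Nat) => ((k : Int) + 1))
    = pvBnds 1 (cs.zip cs.tail) := by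
  intro cs
  induction cs with
  | nil => rfl
  | cons c t ih =>
    cases t with
    | nil => rfl
    | cons d t' =>
      have hlen : (c :: d :: t').length - 1 = t'.length + 1 := by simp
      rw [hlen, List.range_succ_eq_map, List.filter_cons]
      simp only [List.getElem?_cons_succ, List.getElem?_cons_zero]
      simp only [List.length_cons, Nat.add_sub_cancel, List.getElem?_cons_succ,
        List.tail_cons] at ih
      simp only [List.tail_cons, List.zip_cons_cons]
      have hsh : pvBnds (1 + 1 : Int) ((d :: t').zip t') = (pvBnds 1 ((d :: t').zip t')).map (· + 1) :=
        pv_bnds_shift _ 1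
      by_cases hdc : d = c
      · have hp : (some d != some c) = false := by simp [hdc]
        rw [hp]
        simp only [Bool.false_eq_true, if_false, List.filter_map, List.map_map]
        show _ = pvBnds 1 ((c, d) :: (d :: t').zip t')
        rw [show pvBnds 1 ((c, d) :: (d :: t').zip t') = pvBnds (1 + 1) ((d :: t').zip t') by
          simp [pvBnds, hdc]]
        rw [hsh, ← ih, List.map_map]
        congr 1
      · have hp : (some d != some c) = true := by simp [hdc]
        rw [hp]
        simp only [if_true, List.filter_map, List.map_map, List.map_cons]
        show _ = pvBnds 1 ((c, d) :: (d :: t').zip t')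
        rw [show pvBnds 1 ((c, d) :: (d :: t').zip t') = 1 :: pvBnds (1 + 1) ((d :: t').zip t') by
          simp [pvBnds, hdc]]
        rw [hsh, ← ih, List.map_map]
        congr 1

theorem pv_diffs_bnds :
    ∀ (r : List (Char × Char)) (p d : Int),
    pvDiffs (p :: (pvBnds (p + d + 1) r ++ [p + d + 1 + (r.length : Int)])) = pvRlf (d + 1) r := by
  intro r
  induction r with
  | nil => intro p d; simp [pvBnds, pvDiffs, pvRlf]; ring
  | cons q r ih =>
    intro p d
    by_cases h : q.2 = q.1
    · have := ih p (d + 1)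
      simp only [pvBnds, pvRlf, if_pos h, List.length_cons]
      push_cast at this ⊢
      ring_nf at this ⊢
      exact this
    · have := ih (p + d + 1) 0
      norm_num at this
      simp only [pvBnds, pvRlf, if_neg h, List.length_cons, List.cons_append, pvDiffs]
      rw [show p + d + 1 - p = d + 1 by ring]
      push_cast
      rw [show p + d + 1 + ((r.length : Int) + 1) = p + d + 1 + 1 + (r.length : Int) by ring]
      rw [this]

theorem pv_foldA :
    ∀ (ps : List (Char × Char)) (dem kq : Int),
    PySem.Int.mod
      ((ps.foldl
          (fun (p : Int × Int) q =>
            if q.2 = q.1 then (p.1 + 1, p.2) else (1, PySem.Int.mod (p.2 * p.1) 1000000007))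
          (dem, kq)).2 *
        (ps.foldl
          (fun (p : Int × Int) q =>
            if q.2 = q.1 then (p.1 + 1, p.2) else (1, PySem.Int.mod (p.2 * p.1) 1000000007))
          (dem, kq)).1)
      1000000007
    = (pvRlf dem ps).foldl pvMulMod kq := by
  intro ps
  induction ps with
  | nil => intro dem kq; simp [pvRlf, pvMulMod]
  | cons q r ih =>
    intro dem kq
    simp only [List.foldl_cons, pvRlf]
    by_cases h : q.2 = q.1
    · rw [if_pos h, if_pos h]; exact ih (dem + 1) kq
    · rw [if_neg h, if_neg h]
      simp only [List.foldl_cons]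
      exact ih 1 (pvMulMod kq dem)

theorem pv_zipdiff :
    ∀ (cuts : List Int) (kq : Int),
    (cuts.zip (cuts.drop 1)).foldl
        (fun (a : Int) (p : Int × Int) => PySem.Int.mod (a * (p.2 - p.1)) 1000000007) kq
    = (pvDiffs cuts).foldl pvMulMod kq := by
  intro cuts
  induction cuts with
  | nil => intro kq; rfl
  | cons x r ih =>
    intro kq
    cases r with
    | nil => rfl
    | cons y r' =>
      simp only [List.drop_one, List.tail_cons, List.zip_cons_cons, List.foldl_cons, pvDiffs]
      have := ih (pvMulMod kq (y - x))
      simp only [List.drop_one, List.tail_cons] at this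
      exact this

theorem pv_processA (s : String) :
    Process s = PySem.Int.toStr ((pvRlf 1 (s.toList.zip s.toList.tail)).foldl pvMulMod 1) := by
  unfold Process
  generalize s.toList = cs
  dsimp only
  rw [PySem.List.pyRange_one]
  have h1 : ((cs.length : Int) - 1).toNat = cs.length - 1 := by omega
  rw [h1, List.foldl_map]
  rw [List.foldl_ext (g := fun (a : Int × Int) (k : Nat) =>
        (fun (a : Int × Int) (o1 o2 : Option Char) =>
          if o2 = o1 then (a.1 + 1, a.2) else (1, PySem.Int.mod (a.2 * a.1) 1000000007)) a
          cs[k]? cs[k + 1]?)]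
  · rw [pv_foldl_adj (fun (a : Int × Int) (o1 o2 : Option Char) =>
          if o2 = o1 then (a.1 + 1, a.2) else (1, PySem.Int.mod (a.2 * a.1) 1000000007)) cs (1, 1)]
    simp only [Option.some.injEq]
    rw [pv_foldA]
  · intro a k _
    have e1 : (1 + (k : Int)) = ((k + 1 : Nat) : Int) := by push_cast; ring
    have e2 : (((k + 1 : Nat) : Int) - 1) = ((k : Nat) : Int) := by push_cast; ring
    rw [e1, e2, PySem.List.pyGet?_natCast, PySem.List.pyGet?_natCast]

theorem pv_processB (s : String) :
    Process_alt s = PySem.Int.toStr ((pvRlf 1 (s.toList.zip s.toList.tail)).foldl pvMulMod 1) := by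
  unfold Process_alt
  generalize s.toList = cs
  dsimp only
  cases cs with
  | nil => rfl
  | cons c t =>
    have hn : (0 : Int) < ((c :: t).length : Int) := by simp
    rw [PySem.List.pyRange_one_cons hn, List.filter_cons]
    have hp0 : (((0 : Int) == 0) || PySem.List.pyGet? (c :: t) 0 != PySem.List.pyGet? (c :: t) (0 - 1)) = true := by
      simp
    rw [hp0, if_pos rfl]
    simp only [zero_add]
    rw [PySem.List.pyRange_one]
    have h1 : (((c :: t).length : Int) - 1).toNat = (c :: t).length - 1 := by omega
    rw [h1, List.filter_map]
    have hfc : List.filter ((fun i => (i == 0) || PySem.List.pyGet? (c :: t) i != PySem.List.pyGet? (c :: t) (i - 1)) ∘ fun (k : Nat) => (1 : Int) + k) (List.range ((c :: t).length - 1))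
        = List.filter (fun k => (c :: t)[k + 1]? != (c :: t)[k]?) (List.range ((c :: t).length - 1)) := by
      apply List.filter_congr
      intro k _
      have e1 : ((1 : Int) + (k : Int)) = ((k + 1 : Nat) : Int) := by push_cast; ring
      have e0 : (((k + 1 : Nat) : Int) == 0) = false := by
        have hne : ((k + 1 : Nat) : Int) ≠ 0 := by push_cast; omega
        simpa using hne
      have e2 : (((k + 1 : Nat) : Int) - 1) = ((k : Nat) : Int) := by push_cast; ring
      simp only [Function.comp_apply, e1]
      rw [e0, e2, PySem.List.pyGet?_natCast, PySem.List.pyGet?_natCast, Bool.false_or]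
    rw [hfc]
    have hmap : (List.filter (fun k => (c :: t)[k + 1]? != (c :: t)[k]?) (List.range ((c :: t).length - 1))).map (fun (k : Nat) => (1 : Int) + k)
        = (List.filter (fun k => (c :: t)[k + 1]? != (c :: t)[k]?) (List.range ((c :: t).length - 1))).map (fun (k : Nat) => ((k : Int) + 1)) := by
      apply List.map_congr_left
      intro k _
      ring
    rw [hmap, pv_filter_adj, pv_zipdiff]
    have hcuts : (0 : Int) :: pvBnds 1 ((c :: t).zip (c :: t).tail) ++ [((c :: t).length : Int)]
        = (0 : Int) :: (pvBnds (0 + 0 + 1) ((c :: t).zip (c :: t).tail) ++ [0 + 0 + 1 + (((c :: t).zip (c :: t).tail).length : Int)]) := by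
      simp [List.length_zip]
      ring
    rw [hcuts, pv_diffs_bnds]
    norm_num

-- ===== VERDICT (by name: the statement is the Claim_ definition above) =====
theorem Process_spec : Claim_equal_Process := by
  intro s _
  unfold Spec_Process
  rw [pv_processA, pv_processB]
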